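-- pv_equiv track=rewrite | github.com/shengxiaoyu/BiLSTM_CRF_EVENT_DETECT | event_dectect/Event_Model/extract_event.py | __findFoward__
-- ===== SOURCE A (Python) =====
-- def __findFoward__(end, tags, target, quickStop=False):
--     '''find from 0 to self.trigger_begin_index'''
--     '''if quickStop = True ,return when first find target, quickStop=False, return until find last target'''
--     index_pair = [0, 0]
--     haveFound = False
--     # 从头找到触发词index
--     for index in range(0, end):
--         if (tags[index] == 'B_' + target):  # 先找B_ ,后面找到的覆盖前面找到的
--             if (haveFound and quickStop):
--                 break
--             index_pair[0] = index
--             index_pair[1] = index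
--             haveFound = True
--             '''找到完整的'''
--             for index2 in range(index + 1, end):
--                 if (tags[index2] == 'I_' + target):
--                     index_pair[1] = index2
--                 else:
--                     break
--     if (not haveFound):
--         return None
--     return index_pair
-- ===== SOURCE B (Python) =====
-- def __findFoward__(end, tags, target, quickStop=False):
--     """Single linear pass: keep the current span and an 'extending' flag
--     instead of an inner extension loop."""
--     b_tag = 'B_' + target
--     i_tag = 'I_' + target
--     span = None
--     extending = False
--     for i in range(end):
--         tag = tags[i]
--         if tag == b_tag:
--             if quickStop and span is not None:
--                 break
--             span = [i, i]
--             extending = True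
--         elif extending and tag == i_tag:
--             span[1] = i
--         else:
--             extending = False
--     return span
-- ===== Notes on version B (the rewrite author's own statement) =====
-- stated objective: faster
-- what changed: Replaces the nested outer-scan-plus-inner-extension-loop with a single linear pass that maintains the current span and a boolean 'extending' flag, so every index is visited once.
-- outside the precondition, e.g. on __findFoward__(5, ['B_t', 'O', 'B_t'], 't', True): A returns [0, 0], B returns [0, 0]
import Mathlib
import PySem

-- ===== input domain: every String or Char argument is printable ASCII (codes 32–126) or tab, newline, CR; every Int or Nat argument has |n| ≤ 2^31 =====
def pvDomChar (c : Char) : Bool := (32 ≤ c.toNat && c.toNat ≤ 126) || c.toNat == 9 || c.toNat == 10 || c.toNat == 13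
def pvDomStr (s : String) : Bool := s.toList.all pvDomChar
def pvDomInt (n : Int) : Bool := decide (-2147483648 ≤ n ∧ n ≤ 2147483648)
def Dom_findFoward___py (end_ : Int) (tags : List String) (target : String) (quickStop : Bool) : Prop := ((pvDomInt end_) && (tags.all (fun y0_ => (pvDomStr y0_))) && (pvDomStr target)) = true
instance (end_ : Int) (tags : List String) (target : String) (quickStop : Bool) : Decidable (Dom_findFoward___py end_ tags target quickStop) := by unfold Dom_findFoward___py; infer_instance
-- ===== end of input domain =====

-- B replaces A's nested outer-scan-plus-inner-extension-loop by one linear pass with an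
-- 'extending' flag (simpler decomposition); equivalence is about the return value only.

-- ===== PORT A =====
-- inner loop: for index2 in range(index+1, end): if tags[index2]=='I_'+target: pair[1]=index2 else break
def pvInnerA (tags : List String) (target : String) : List Int → Int → Int
  | [], hi => hi
  | j :: rest, hi =>
    if PySem.List.pyGetD tags j "" = "I_" ++ target then pvInnerA tags target rest j
    else hi

-- outer loop over range(0, end) with state (index_pair, haveFound); break returns the pair
def pvOuterA (tags : List String) (target : String) (quickStop : Bool) (end_ : Int) :
    List Int → Int × Int → Bool → Option (List Int)
  | [], pair, found => if found then some [pair.1, pair.2] else none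
  | i :: rest, pair, found =>
    if PySem.List.pyGetD tags i "" = "B_" ++ target then
      if found && quickStop then some [pair.1, pair.2]   -- break with haveFound = true
      else pvOuterA tags target quickStop end_ rest
        (i, pvInnerA tags target (PySem.List.pyRange (i + 1) end_ 1) i) true
    else pvOuterA tags target quickStop end_ rest pair found

def findFoward___py (end_ : Int) (tags : List String) (target : String) (quickStop : Bool) : Option (List Int) :=
  pvOuterA tags target quickStop end_ (PySem.List.pyRange 0 end_ 1) (0, 0) false

-- ===== PORT B =====
-- single pass: span : Option (Int × Int), extending : Bool; span[1]=i becomes Option.map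
def pvScanB (tags : List String) (target : String) (quickStop : Bool) :
    List Int → Option (Int × Int) → Bool → Option (Int × Int)
  | [], span, _ => span
  | i :: rest, span, ext =>
    let tag := PySem.List.pyGetD tags i ""
    if tag = "B_" ++ target then
      if quickStop && span.isSome then span            -- break
      else pvScanB tags target quickStop rest (some (i, i)) true
    else if ext && tag = "I_" ++ target then
      pvScanB tags target quickStop rest (span.map (fun p => (p.1, i))) true
    else pvScanB tags target quickStop rest span false

def findFoward___py_alt (end_ : Int) (tags : List String) (target : String) (quickStop : Bool) : Option (List Int) :=
  (pvScanB tags target quickStop (PySem.List.pyRange 0 end_ 1) none false).map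
    (fun p => [p.1, p.2])

-- ===== PRECONDITION & SPEC =====
-- Pre_ excludes end_ > len(tags): there Python A normally raises IndexError, except that a
-- quickStop early break can still return before reaching an out-of-range index (see cites).
def Pre_findFoward___py (end_ : Int) (tags : List String) (target : String) (quickStop : Bool) : Prop :=
  end_ ≤ (tags.length : Int)
instance (end_ : Int) (tags : List String) (target : String) (quickStop : Bool) : Decidable (Pre_findFoward___py end_ tags target quickStop) := by unfold Pre_findFoward___py; infer_instance

def pvWitness_findFoward___py : Int × List String × String × Bool :=
  (3, (["B_t", "I_t", "O"], ("t", false)))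

def Spec_findFoward___py (end_ : Int) (tags : List String) (target : String) (quickStop : Bool) (out : Option (List Int)) : Prop := out = findFoward___py_alt end_ tags target quickStop
instance (end_ : Int) (tags : List String) (target : String) (quickStop : Bool) (out : Option (List Int)) : Decidable (Spec_findFoward___py end_ tags target quickStop out) := by unfold Spec_findFoward___py; infer_instance

-- ===== CLAIM (what is proved, stated in full; the proofs are below) =====
def Claim_equal_findFoward___py : Prop := ∀ (end_ : Int) (tags : List String) (target : String) (quickStop : Bool), Dom_findFoward___py end_ tags target quickStop → Pre_findFoward___py end_ tags target quickStop → Spec_findFoward___py end_ tags target quickStop (findFoward___py end_ tags target quickStop)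

-- ===== LEMMAS AND PROOFS =====

lemma pv_btag_ne_itag (t : String) : ("B_" ++ t) ≠ ("I_" ++ t) := by
  intro h
  have h2 := congrArg String.toList h
  simp [String.toList_append] at h2

-- step lemmas for A's loops
lemma pv_inner_cons_I (tags : List String) (target : String) (j : Int) (rest : List Int) (hi : Int)
    (h : PySem.List.pyGetD tags j "" = "I_" ++ target) :
    pvInnerA tags target (j :: rest) hi = pvInnerA tags target rest j := by
  simp [pvInnerA, h]

lemma pv_inner_cons_not (tags : List String) (target : String) (j : Int) (rest : List Int) (hi : Int)
    (h : PySem.List.pyGetD tags j "" ≠ "I_" ++ target) :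
    pvInnerA tags target (j :: rest) hi = hi := by
  simp [pvInnerA, h]

lemma pv_outer_cons_skip (tags : List String) (target : String) (quickStop : Bool) (e i : Int)
    (rest : List Int) (pair : Int × Int) (found : Bool)
    (h : PySem.List.pyGetD tags i "" ≠ "B_" ++ target) :
    pvOuterA tags target quickStop e (i :: rest) pair found
      = pvOuterA tags target quickStop e rest pair found := by
  simp [pvOuterA, h]

lemma pv_outer_cons_break (tags : List String) (target : String) (quickStop : Bool) (e i : Int)
    (rest : List Int) (pair : Int × Int) (found : Bool)
    (h : PySem.List.pyGetD tags i "" = "B_" ++ target)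
    (hf : found = true) (hq : quickStop = true) :
    pvOuterA tags target quickStop e (i :: rest) pair found = some [pair.1, pair.2] := by
  simp [pvOuterA, h, hf, hq]

lemma pv_outer_cons_found (tags : List String) (target : String) (quickStop : Bool) (e i : Int)
    (rest : List Int) (pair : Int × Int) (found : Bool)
    (h : PySem.List.pyGetD tags i "" = "B_" ++ target)
    (hfq : (found && quickStop) = false) :
    pvOuterA tags target quickStop e (i :: rest) pair found
      = pvOuterA tags target quickStop e rest
          (i, pvInnerA tags target (PySem.List.pyRange (i + 1) e 1) i) true := by
  rcases Bool.and_eq_false_iff.mp hfq with hx | hx <;> simp [pvOuterA, h, hx]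

-- step lemmas for B's single pass
lemma pv_scan_cons_B_break (tags : List String) (target : String) (quickStop : Bool) (i : Int)
    (rest : List Int) (span : Option (Int × Int)) (ext : Bool)
    (h : PySem.List.pyGetD tags i "" = "B_" ++ target)
    (hq : (quickStop && span.isSome) = true) :
    pvScanB tags target quickStop (i :: rest) span ext = span := by
  simp [pvScanB, h, hq]

lemma pv_scan_cons_B_go (tags : List String) (target : String) (quickStop : Bool) (i : Int)
    (rest : List Int) (span : Option (Int × Int)) (ext : Bool)
    (h : PySem.List.pyGetD tags i "" = "B_" ++ target)
    (hq : (quickStop && span.isSome) = false) :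
    pvScanB tags target quickStop (i :: rest) span ext
      = pvScanB tags target quickStop rest (some (i, i)) true := by
  simp [pvScanB, h, hq]

lemma pv_scan_cons_I_ext (tags : List String) (target : String) (quickStop : Bool) (i : Int)
    (rest : List Int) (span : Option (Int × Int))
    (hB : PySem.List.pyGetD tags i "" ≠ "B_" ++ target)
    (hI : PySem.List.pyGetD tags i "" = "I_" ++ target) :
    pvScanB tags target quickStop (i :: rest) span true
      = pvScanB tags target quickStop rest (span.map (fun p => (p.1, i))) true := by
  simp [pvScanB, hB, hI]

lemma pv_scan_cons_ext_false (tags : List String) (target : String) (quickStop : Bool) (i : Int)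
    (rest : List Int) (span : Option (Int × Int))
    (hB : PySem.List.pyGetD tags i "" ≠ "B_" ++ target) :
    pvScanB tags target quickStop (i :: rest) span false
      = pvScanB tags target quickStop rest span false := by
  simp [pvScanB, hB]

lemma pv_scan_cons_true_notI (tags : List String) (target : String) (quickStop : Bool) (i : Int)
    (rest : List Int) (span : Option (Int × Int))
    (hB : PySem.List.pyGetD tags i "" ≠ "B_" ++ target)
    (hI : PySem.List.pyGetD tags i "" ≠ "I_" ++ target) :
    pvScanB tags target quickStop (i :: rest) span true
      = pvScanB tags target quickStop rest span false := by
  simp [pvScanB, hB, hI]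

-- the joint loop invariant, by induction on the length of the remaining range:
-- at every position either (ext = false and A's pair mirrors B's span), or (ext = true and
-- A's pair.2 is what the inner extension loop computes from B's current span over the rest)
lemma pv_key (tags : List String) (target : String) (quickStop : Bool) (e : Int) :
    ∀ n : Nat, ∀ p : Int, (e - p).toNat = n →
      ((∀ (pair : Int × Int) (found : Bool) (span : Option (Int × Int)),
          found = span.isSome → (∀ q, span = some q → pair = q) →
          pvOuterA tags target quickStop e (PySem.List.pyRange p e 1) pair found
            = (pvScanB tags target quickStop (PySem.List.pyRange p e 1) span false).map
                (fun q => [q.1, q.2])) ∧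
       (∀ a x : Int,
          pvOuterA tags target quickStop e (PySem.List.pyRange p e 1)
              (a, pvInnerA tags target (PySem.List.pyRange p e 1) x) true
            = (pvScanB tags target quickStop (PySem.List.pyRange p e 1) (some (a, x)) true).map
                (fun q => [q.1, q.2]))) := by
  intro n
  induction n with
  | zero =>
    intro p hp
    rw [PySem.List.pyRange_one_eq_nil (by omega)]
    constructor
    · intro pair found span hfound hpair
      cases span with
      | none => simp [pvOuterA, pvScanB] at hfound ⊢; simp [hfound]
      | some q =>
        have := hpair q rfl
        simp [pvOuterA, pvScanB] at hfound ⊢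
        simp [hfound, this]
    · intro a x
      simp [pvOuterA, pvScanB, pvInnerA]
  | succ n ih =>
    intro p hp
    have hlt : p < e := by omega
    have ihP := ih (p + 1) (by omega)
    rw [PySem.List.pyRange_one_cons hlt]
    constructor
    · intro pair found span hfound hpair
      by_cases hB : PySem.List.pyGetD tags p "" = "B_" ++ target
      · by_cases hfq : (found && quickStop) = true
        · obtain ⟨hf, hq⟩ := Bool.and_eq_true_iff.mp hfq
          have hsome : span.isSome = true := by rw [← hfound, hf]
          obtain ⟨q, hqq⟩ := Option.isSome_iff_exists.mp hsome
          rw [pv_outer_cons_break _ _ _ _ _ _ _ _ hB hf hq,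
              pv_scan_cons_B_break _ _ _ _ _ _ _ hB (by simp [hq, hsome]), hqq,
              hpair q hqq]
          rfl
        · have hfq' : (found && quickStop) = false := Bool.eq_false_iff.mpr hfq
          rw [pv_outer_cons_found _ _ _ _ _ _ _ _ hB hfq',
              pv_scan_cons_B_go _ _ _ _ _ _ _ hB
                (by rw [← hfound, Bool.and_comm]; exact hfq')]
          exact ihP.2 p p
      · rw [pv_outer_cons_skip _ _ _ _ _ _ _ _ hB, pv_scan_cons_ext_false _ _ _ _ _ _ hB]
        exact ihP.1 pair found span hfound hpair
    · intro a x
      by_cases hB : PySem.List.pyGetD tags p "" = "B_" ++ target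
      · have hnI : PySem.List.pyGetD tags p "" ≠ "I_" ++ target := by
          rw [hB]; exact pv_btag_ne_itag target
        rw [pv_inner_cons_not _ _ _ _ _ hnI]
        by_cases hq : quickStop = true
        · rw [pv_outer_cons_break _ _ _ _ _ _ _ _ hB rfl hq,
              pv_scan_cons_B_break _ _ _ _ _ _ _ hB (by simp [hq])]
          rfl
        · have hq' : quickStop = false := Bool.eq_false_iff.mpr hq
          rw [pv_outer_cons_found _ _ _ _ _ _ _ _ hB (by simp [hq']),
              pv_scan_cons_B_go _ _ _ _ _ _ _ hB (by simp [hq'])]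
          exact ihP.2 p p
      · by_cases hI : PySem.List.pyGetD tags p "" = "I_" ++ target
        · rw [pv_inner_cons_I _ _ _ _ _ hI, pv_outer_cons_skip _ _ _ _ _ _ _ _ hB,
              pv_scan_cons_I_ext _ _ _ _ _ _ hB hI, Option.map_some]
          exact ihP.2 a p
        · rw [pv_inner_cons_not _ _ _ _ _ hI, pv_outer_cons_skip _ _ _ _ _ _ _ _ hB,
              pv_scan_cons_true_notI _ _ _ _ _ _ hB hI]
          exact ihP.1 (a, x) true (some (a, x)) (by simp) (by intro q hq; cases hq; rfl)

-- ===== VERDICT (by name: the statement is the Claim_ definition above) =====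
theorem findFoward___py_spec : Claim_equal_findFoward___py := by
  intro end_ tags target quickStop _ _
  unfold Spec_findFoward___py findFoward___py findFoward___py_alt
  exact (pv_key tags target quickStop end_ (end_ - 0).toNat 0 rfl).1 (0, 0) false none
    (by simp) (by intro q hq; cases hq)
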